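-- pv_equiv track=rewrite | github.com/ashwinbansod/Sentiment_Analysis | happiest_state.py | getTweetHappinessScore
-- ===== SOURCE A (Python) =====
-- def getTweetHappinessScore(tweet_text, sentimentDict, phraseDict):
--     tweetHappinessScore = 0
--     # Split tweet text into separate words
--     newtweetstr = str.lower(tweet_text.replace('\n', ' ').replace('\r', ''))
--
--     # Check if any phrase in phraseDict exist in tweet,
--     # Add its sentiment value to total
--     # otherwise skip it.
--     for phrase in phraseDict:
--         if phrase in newtweetstr:
--             tweetHappinessScore += phraseDict[phrase]
--         else:
--             # Do nothing
--             continue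
--
--     # Split the tweet text into word list
--     wordList = newtweetstr.split(' ')
--
--     # Check for each word in word list, if it exist in setimentDict,
--     # Add its sentiment value to total
--     # otherwise skip it.
--     for word in wordList:
--         if word in sentimentDict:
--             tweetHappinessScore += sentimentDict[word]
--         else:
--             # Do nothing
--             continue
--
--     return tweetHappinessScore
-- ===== SOURCE B (Python) =====
-- def getTweetHappinessScore(tweet_text, sentimentDict, phraseDict):
--     text = tweet_text.replace('\n', ' ').replace('\r', '').lower()
--     # phrase part: one pass over the phrase items, summing matching values
--     score = sum(v for p, v in phraseDict.items() if p in text)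
--     # word part: count the words once, then one pass over the sentiment items
--     counts = {}
--     for w in text.split(' '):
--         counts[w] = counts.get(w, 0) + 1
--     for w, v in sentimentDict.items():
--         score += v * counts.get(w, 0)
--     return score
-- ===== Notes on version B (the rewrite author's own statement) =====
-- stated objective: alternative
-- what changed: B sums the phrase items in one filtered pass instead of iterating keys and re-looking each key up, and replaces A's per-word dict-membership loop by counting the words once and taking a single pass over the sentiment items (value times word count).
import Mathlib
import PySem

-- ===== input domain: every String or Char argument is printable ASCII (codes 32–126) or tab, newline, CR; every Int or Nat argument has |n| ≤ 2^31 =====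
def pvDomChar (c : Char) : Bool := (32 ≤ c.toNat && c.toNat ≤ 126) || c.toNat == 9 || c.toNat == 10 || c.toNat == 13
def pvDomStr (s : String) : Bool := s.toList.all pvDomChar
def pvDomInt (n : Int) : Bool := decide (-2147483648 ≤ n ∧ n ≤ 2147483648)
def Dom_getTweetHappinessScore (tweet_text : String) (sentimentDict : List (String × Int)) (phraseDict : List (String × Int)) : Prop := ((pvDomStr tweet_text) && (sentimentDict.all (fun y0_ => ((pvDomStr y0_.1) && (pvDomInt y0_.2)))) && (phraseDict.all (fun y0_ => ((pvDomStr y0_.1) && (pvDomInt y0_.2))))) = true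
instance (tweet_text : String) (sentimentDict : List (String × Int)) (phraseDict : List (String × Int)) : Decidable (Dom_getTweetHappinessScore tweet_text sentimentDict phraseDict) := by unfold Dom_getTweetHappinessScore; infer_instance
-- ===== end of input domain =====

-- ===== PORT A =====
-- B changes the traversal (filtered item pass for phrases; a word-count table then one
-- pass over the sentiment items for words); same cost class, no speed claim.
def getTweetHappinessScore (tweet_text : String) (sentimentDict : List (String × Int)) (phraseDict : List (String × Int)) : Int :=
  let newtweetstr := PySem.Str.lower (PySem.Str.replace (PySem.Str.replace tweet_text "\n" " ") "\r" "")
  let s1 := (PySem.Dict.mk phraseDict).keys.foldl (fun acc phrase =>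
    if PySem.Str.isIn phrase newtweetstr then acc + (PySem.Dict.mk phraseDict).getD phrase 0 else acc) 0
  let wordList := (PySem.Str.split? newtweetstr " ").getD []
  wordList.foldl (fun acc word =>
    if (PySem.Dict.mk sentimentDict).contains word then acc + (PySem.Dict.mk sentimentDict).getD word 0 else acc) s1

-- ===== PORT B =====
def getTweetHappinessScore_alt (tweet_text : String) (sentimentDict : List (String × Int)) (phraseDict : List (String × Int)) : Int :=
  let text := PySem.Str.lower (PySem.Str.replace (PySem.Str.replace tweet_text "\n" " ") "\r" "")
  let score := (((PySem.Dict.mk phraseDict).items.filter (fun p => PySem.Str.isIn p.1 text)).map Prod.snd).sum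
  let counts := ((PySem.Str.split? text " ").getD []).foldl (fun d w => d.insert w (d.getD w 0 + 1)) PySem.Dict.empty
  (PySem.Dict.mk sentimentDict).items.foldl (fun acc p => acc + p.2 * counts.getD p.1 0) score

-- ===== PRECONDITION & SPEC =====
-- Pre_ excludes association lists with duplicate keys: they do not represent a Python dict
-- (Python collapses them before the function runs), and on them A's iterate-keys-and-relookup
-- and B's iterate-items accumulate values differently.
def Pre_getTweetHappinessScore (tweet_text : String) (sentimentDict : List (String × Int)) (phraseDict : List (String × Int)) : Prop :=
  (sentimentDict.map Prod.fst).Nodup ∧ (phraseDict.map Prod.fst).Nodup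
instance (tweet_text : String) (sentimentDict : List (String × Int)) (phraseDict : List (String × Int)) : Decidable (Pre_getTweetHappinessScore tweet_text sentimentDict phraseDict) := by unfold Pre_getTweetHappinessScore; infer_instance

def pvWitness_getTweetHappinessScore : String × (List (String × Int)) × (List (String × Int)) :=
  ("happy day", [("happy", 3), ("sad", -2)], [("happy day", 2)])

def Spec_getTweetHappinessScore (tweet_text : String) (sentimentDict : List (String × Int)) (phraseDict : List (String × Int)) (out : Int) : Prop := out = getTweetHappinessScore_alt tweet_text sentimentDict phraseDict
instance (tweet_text : String) (sentimentDict : List (String × Int)) (phraseDict : List (String × Int)) (out : Int) : Decidable (Spec_getTweetHappinessScore tweet_text sentimentDict phraseDict out) := by unfold Spec_getTweetHappinessScore; infer_instance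

-- ===== CLAIM (what is proved, stated in full; the proofs are below) =====
def Claim_equal_getTweetHappinessScore : Prop := ∀ (tweet_text : String) (sentimentDict : List (String × Int)) (phraseDict : List (String × Int)), Dom_getTweetHappinessScore tweet_text sentimentDict phraseDict → Pre_getTweetHappinessScore tweet_text sentimentDict phraseDict → Spec_getTweetHappinessScore tweet_text sentimentDict phraseDict (getTweetHappinessScore tweet_text sentimentDict phraseDict)

-- ===== LEMMAS AND PROOFS =====

-- A's phrase loop (fold over the list, conditionally adding the pair's own value) is the
-- sum of the matching values, with any start value.
theorem phrase_fold_eq_sum (l : List (String × Int)) (c : String → Bool) (a : Int) :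
    l.foldl (fun acc p => if c p.1 then acc + p.2 else acc) a
      = a + ((l.filter (fun p => c p.1)).map Prod.snd).sum := by
  induction l generalizing a with
  | nil => simp
  | cons p t ih =>
    by_cases h : c p.1 = true <;> simp [List.foldl_cons, h, ih, add_assoc]

-- getD in a Nodup dict returns the pair's own value.
theorem getD_self_of_nodup (l : List (String × Int)) (h : (l.map Prod.fst).Nodup)
    (p : String × Int) (hp : p ∈ l) : (PySem.Dict.mk l).getD p.1 0 = p.2 := by
  exact PySem.Dict.getD_of_mem_items (d := PySem.Dict.mk l) (k := p.1) (v := p.2) hp h 0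

-- sum of a single-key indicator over the words is value * count
theorem sum_ite_eq_count (ws : List String) (k : String) (v : Int) :
    (ws.map (fun w => if w = k then v else 0)).sum = v * (ws.count k : Int) := by
  induction ws with
  | nil => simp
  | cons w t ih =>
    by_cases hw : w = k
    · simp [hw, ih]; ring
    · have : ¬ (k = w) := fun e => hw e.symm
      simp [hw, ih]

-- summing a per-word lookup over the words equals summing value*count over Nodup dict items
theorem sum_getD_eq_sum_count (words : List String) (l : List (String × Int))
    (h : (l.map Prod.fst).Nodup) :
    (words.map (fun w => (PySem.Dict.mk l).getD w 0)).sum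
      = (l.map (fun p => p.2 * (words.count p.1 : Int))).sum := by
  induction l with
  | nil =>
    simp [PySem.Dict.getD_eq_get?_getD, PySem.Dict.get?]
  | cons p t ih =>
    simp only [List.map_cons, List.nodup_cons] at h
    have hk : p.1 ∉ t.map Prod.fst := h.1
    have ht := ih h.2
    have hget : ∀ w, (PySem.Dict.mk (p :: t)).getD w 0
        = (if w = p.1 then p.2 else 0) + (PySem.Dict.mk t).getD w 0 := by
      intro w
      rw [PySem.Dict.getD_eq_get?_getD, PySem.Dict.get?_mk_cons,
          PySem.Dict.getD_eq_get?_getD (d := PySem.Dict.mk t)]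
      by_cases hw : p.1 = w
      · have hnone : (PySem.Dict.mk t).get? w = none := by
          rw [PySem.Dict.get?_eq_none_iff_not_mem_keys, ← hw]
          simpa [PySem.Dict.keys] using hk
        simp [hw, hnone]
      · have hw' : ¬ (w = p.1) := fun e => hw e.symm
        simp [hw, hw']
    calc (words.map (fun w => (PySem.Dict.mk (p :: t)).getD w 0)).sum
        = (words.map (fun w => (if w = p.1 then p.2 else 0) + (PySem.Dict.mk t).getD w 0)).sum := by
          simp only [hget]
      _ = (words.map (fun w => if w = p.1 then p.2 else 0)).sum
            + (words.map (fun w => (PySem.Dict.mk t).getD w 0)).sum := by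
          rw [← List.sum_map_add]
      _ = p.2 * (words.count p.1 : Int)
            + (t.map (fun q => q.2 * (words.count q.1 : Int))).sum := by
          rw [ht, sum_ite_eq_count]
      _ = ((p :: t).map (fun q => q.2 * (words.count q.1 : Int))).sum := by simp

-- ===== VERDICT (by name: the statement is the Claim_ definition above) =====
theorem getTweetHappinessScore_spec : Claim_equal_getTweetHappinessScore := by
  intro tweet_text sentimentDict phraseDict _hdom hpre
  obtain ⟨hs, hp⟩ := hpre
  unfold Spec_getTweetHappinessScore getTweetHappinessScore getTweetHappinessScore_alt
  set text := PySem.Str.lower (PySem.Str.replace (PySem.Str.replace tweet_text "\n" " ") "\r" "") with htext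
  set words := (PySem.Str.split? text " ").getD [] with hwords
  -- phrase part
  have hphrase :
      (PySem.Dict.mk phraseDict).keys.foldl (fun acc phrase =>
        if PySem.Str.isIn phrase text then acc + (PySem.Dict.mk phraseDict).getD phrase 0 else acc) 0
      = (((PySem.Dict.mk phraseDict).items.filter (fun p => PySem.Str.isIn p.1 text)).map Prod.snd).sum := by
    have hkeys : (PySem.Dict.mk phraseDict).keys = phraseDict.map Prod.fst := rfl
    rw [hkeys, List.foldl_map]
    have hcong : phraseDict.foldl (fun acc p =>
          if PySem.Str.isIn p.1 text then acc + (PySem.Dict.mk phraseDict).getD p.1 0 else acc) 0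
        = phraseDict.foldl (fun acc p =>
          if PySem.Str.isIn p.1 text then acc + p.2 else acc) 0 := by
      apply PySem.List.foldl_congr_mem
      intro acc p hmem
      rw [getD_self_of_nodup phraseDict hp p hmem]
    rw [hcong, phrase_fold_eq_sum phraseDict (fun s => PySem.Str.isIn s text) 0]
    rw [Int.zero_add]
  -- word part
  have hcounts : ∀ w, ((words.foldl (fun d w => d.insert w (d.getD w 0 + 1)) PySem.Dict.empty).getD w 0)
      = (words.count w : Int) := by
    intro w
    rw [PySem.Dict.getD_foldl_insert_add_one, PySem.Dict.getD_empty]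
    exact Int.zero_add _
  have hword : ∀ (a : Int),
      words.foldl (fun acc word =>
        if (PySem.Dict.mk sentimentDict).contains word then acc + (PySem.Dict.mk sentimentDict).getD word 0 else acc) a
      = (PySem.Dict.mk sentimentDict).items.foldl (fun acc p =>
          acc + p.2 * ((words.foldl (fun d w => d.insert w (d.getD w 0 + 1)) PySem.Dict.empty).getD p.1 0)) a := by
    intro a
    have h1 : words.foldl (fun acc word =>
          if (PySem.Dict.mk sentimentDict).contains word then acc + (PySem.Dict.mk sentimentDict).getD word 0 else acc) a
        = words.foldl (fun acc word => acc + (PySem.Dict.mk sentimentDict).getD word 0) a := by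
      apply PySem.List.foldl_congr_mem
      intro acc w _
      by_cases hc : (PySem.Dict.mk sentimentDict).contains w = true
      · simp [hc]
      · have hc' : (PySem.Dict.mk sentimentDict).contains w = false := Bool.eq_false_iff.mpr hc
        have h0 : (PySem.Dict.mk sentimentDict).getD w 0 = 0 :=
          PySem.Dict.getD_of_not_contains _ 0 hc'
        rw [if_neg hc, h0, Int.add_zero]
    have h2 : (PySem.Dict.mk sentimentDict).items.foldl (fun acc p =>
          acc + p.2 * ((words.foldl (fun d w => d.insert w (d.getD w 0 + 1)) PySem.Dict.empty).getD p.1 0)) a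
        = (PySem.Dict.mk sentimentDict).items.foldl (fun acc p =>
          acc + p.2 * (words.count p.1 : Int)) a := by
      apply PySem.List.foldl_congr_mem
      intro acc p _
      rw [hcounts p.1]
    rw [h1, h2, PySem.List.foldl_add, PySem.List.foldl_add]
    have hitems : (PySem.Dict.mk sentimentDict).items = sentimentDict := rfl
    rw [hitems, sum_getD_eq_sum_count words sentimentDict hs]
  rw [hword, hphrase]
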